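-- pv_equiv track=rewrite | github.com/briatmines/f25-dbm-final-project | browser/units.py | to_minecraft
-- ===== SOURCE A (Python) =====
-- UNITS = [
--     (64*27*27, 'chest{} of shulker boxes', 's'),
--     (64*27, 'chest{}', 's'),
--     (64, 'stack{}', 's'),
-- ]
--
-- def to_minecraft(number):
--     parts = []
--     for unit, name, suffix in UNITS:
--         count, number = divmod(number, unit)
--         if count:
--             english = name.format(suffix if count > 1 else '')
--             parts.append(f'{count} {english}')
--     if number or not len(parts):
--         parts.append(str(number))
--     text = ' and '.join(parts)
--     return text
-- ===== SOURCE B (Python) =====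
-- UNITS_ASC = [
--     ('stack{}', 27),
--     ('chest{}', 27),
--     ('chest{} of shulker boxes', None),
-- ]
--
-- def _fmt(count, name):
--     if count:
--         return [f"{count} {name.format('s' if count > 1 else '')}"]
--     return []
--
-- def _parts(n, units):
--     if not units:
--         return []
--     name, base = units[0]
--     if base is None:
--         return _fmt(n, name)
--     return _parts(n // base, units[1:]) + _fmt(n % base, name)
--
-- def to_minecraft(number):
--     q, items = divmod(number, 64)
--     parts = _parts(q, UNITS_ASC)
--     if items or not parts:
--         parts.append(str(items))
--     return ' and '.join(parts)
-- ===== Notes on version B (the rewrite author's own statement) =====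
-- stated objective: alternative
-- what changed: B replaces A's descending absolute-threshold divmod loop with a recursion over an ascending step-base unit list: it peels off items first, recurses upward dividing by each step base (27, 27), and builds the parts list back-to-front (largest prepended by the recursion's return), then joins.
import Mathlib
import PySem

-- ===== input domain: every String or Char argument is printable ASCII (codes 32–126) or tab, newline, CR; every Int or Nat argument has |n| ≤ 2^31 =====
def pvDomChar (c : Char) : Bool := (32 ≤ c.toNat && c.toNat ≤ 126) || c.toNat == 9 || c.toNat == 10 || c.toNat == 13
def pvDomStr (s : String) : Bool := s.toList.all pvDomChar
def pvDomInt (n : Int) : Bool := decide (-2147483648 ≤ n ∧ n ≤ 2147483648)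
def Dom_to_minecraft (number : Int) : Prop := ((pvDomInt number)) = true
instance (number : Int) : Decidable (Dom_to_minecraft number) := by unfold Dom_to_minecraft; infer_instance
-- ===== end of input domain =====

-- B recurses over an ascending step-base unit list, building the parts back-to-front,
-- instead of A's descending absolute-threshold divmod loop (objective: alternative decomposition).

-- ===== PORT A =====
-- name.format(suffix): each name is a constant with one '{}', ported exactly as
-- (before, after) with before ++ suffix ++ after (exact for these literal names).
def pvUNITS : List (Int × String × String) :=
  [(46656, "chest", " of shulker boxes"), (1728, "chest", ""), (64, "stack", "")]

def pvStepA (st : List String × Int) (u : Int × String × String) : List String × Int :=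
  let count := PySem.Int.floordiv st.2 u.1
  let number := PySem.Int.mod st.2 u.1
  (if count ≠ 0 then
     st.1 ++ [PySem.Int.toStr count ++ " " ++ (u.2.1 ++ (if count > 1 then "s" else "") ++ u.2.2)]
   else st.1, number)

def to_minecraft (number : Int) : String :=
  let st := pvUNITS.foldl pvStepA ([], number)
  let parts := if st.2 ≠ 0 ∨ st.1.length = 0 then st.1 ++ [PySem.Int.toStr st.2] else st.1
  PySem.Str.join " and " parts

-- ===== PORT B =====
-- Python's names are literal one-'{}' templates; ported as (before, after) pairs.
def pvFmt (count : Int) (before after : String) : List String :=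
  if count ≠ 0 then
    [PySem.Int.toStr count ++ " " ++ (before ++ (if count > 1 then "s" else "") ++ after)]
  else []

def pvPartsB : Int → List (String × String × Option Int) → List String
  | _, [] => []
  | n, (b, a, none) :: _ => pvFmt n b a
  | n, (b, a, some base) :: rest =>
      pvPartsB (PySem.Int.floordiv n base) rest ++ pvFmt (PySem.Int.mod n base) b a

def pvUNITS_ASC : List (String × String × Option Int) :=
  [("stack", "", some 27), ("chest", "", some 27), ("chest", " of shulker boxes", none)]

def to_minecraft_alt (number : Int) : String :=
  let q := PySem.Int.floordiv number 64
  let items := PySem.Int.mod number 64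
  let parts := pvPartsB q pvUNITS_ASC
  let parts := if items ≠ 0 ∨ parts.length = 0 then parts ++ [PySem.Int.toStr items] else parts
  PySem.Str.join " and " parts

-- ===== PRECONDITION & SPEC =====
def Spec_to_minecraft (number : Int) (out : String) : Prop := out = to_minecraft_alt number
instance (number : Int) (out : String) : Decidable (Spec_to_minecraft number out) := by unfold Spec_to_minecraft; infer_instance

-- ===== CLAIM =====
def Claim_equal_to_minecraft : Prop := ∀ (number : Int), Dom_to_minecraft number → Spec_to_minecraft number (to_minecraft number)

-- ===== LEMMAS AND PROOFS =====
theorem pv_counts (n : Int) :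
    PySem.Int.floordiv (PySem.Int.floordiv (PySem.Int.floordiv n 64) 27) 27 = PySem.Int.floordiv n 46656 ∧
    PySem.Int.mod (PySem.Int.floordiv (PySem.Int.floordiv n 64) 27) 27 = PySem.Int.floordiv (PySem.Int.mod n 46656) 1728 ∧
    PySem.Int.mod (PySem.Int.floordiv n 64) 27 = PySem.Int.floordiv (PySem.Int.mod (PySem.Int.mod n 46656) 1728) 64 ∧
    PySem.Int.mod n 64 = PySem.Int.mod (PySem.Int.mod (PySem.Int.mod n 46656) 1728) 64 := by
  simp only [PySem.Int.floordiv_eq_ediv_of_pos (b := 64) (by norm_num),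
    PySem.Int.floordiv_eq_ediv_of_pos (b := 27) (by norm_num),
    PySem.Int.floordiv_eq_ediv_of_pos (b := 1728) (by norm_num),
    PySem.Int.floordiv_eq_ediv_of_pos (b := 46656) (by norm_num),
    PySem.Int.mod_eq_emod_of_pos (b := 64) (by norm_num),
    PySem.Int.mod_eq_emod_of_pos (b := 27) (by norm_num),
    PySem.Int.mod_eq_emod_of_pos (b := 1728) (by norm_num),
    PySem.Int.mod_eq_emod_of_pos (b := 46656) (by norm_num)]
  omega

theorem pv_last (c3 q : Prop) [Decidable c3] [Decidable q] (p1 p2 : List String) (s3 it : String) :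
    ((if c3 then p1 ++ (p2 ++ [s3]) else p1 ++ p2) ++
        if q ∨ (if c3 then p1 ++ (p2 ++ [s3]) else p1 ++ p2).length = 0 then [it] else []) =
      (if q ∨ (p1 ++ (p2 ++ if c3 then [s3] else [])).length = 0 then
        p1 ++ (p2 ++ ((if c3 then [s3] else []) ++ [it]))
      else p1 ++ (p2 ++ if c3 then [s3] else [])) := by
  by_cases h : c3 <;> by_cases hq : q <;> by_cases hl : p1 = [] ∧ p2 = [] <;>
    simp [h, hq, hl, List.append_assoc]

theorem pv_ite_app {c : Prop} [Decidable c] (l : List String) (x : String) :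
    (if c then l ++ [x] else l) = l ++ (if c then [x] else []) := by
  split_ifs <;> simp

-- ===== VERDICT =====
theorem to_minecraft_spec : Claim_equal_to_minecraft := by
  intro n _
  unfold Spec_to_minecraft to_minecraft to_minecraft_alt
  obtain ⟨h1, h2, h3, h4⟩ := pv_counts n
  simp only [pvUNITS, pvUNITS_ASC, List.foldl, pvStepA, pvPartsB, pvFmt, h1, h2, h3, h4,
    pv_ite_app, List.nil_append, List.append_assoc]
  exact congrArg (PySem.Str.join " and ") (pv_last _ _ _ _ _ _)
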